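-- pv_equiv track=rewrite | github.com/toniali/ParseResumes | ResumeWithKeywordWeight.py | get_weight_from_keyword
-- ===== SOURCE A (Python) =====
-- from typing import Final
--
-- job_skill_single_keywords: Final = ["Java*10", "Node.js*6", "AngularJS*4","JavaScript*4", "Maven*3", "web*2", "Agile*5"]
--
-- job_skill_phrase_keywords = ["REST service*4", "REST services*5", "Web Service*9", "Web Services*9", "project manager*3", "team work*5"
--                              ,"computer science*8"]
--
-- def get_weight_from_keyword(search_keyword):
--     keyword_weight = 0
--     for keyword in job_skill_single_keywords:
--         #if match
--         keyword_content = keyword[0: keyword.index("*")].strip().lower()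
--         if keyword_content == search_keyword:
--             keyword_weight = int(keyword[keyword.index("*") + 1: len(keyword)].strip())
--             #print ( search_keyword + " weight:"+ str(keyword[keyword.index("*") + 1: len(keyword)]))
--             break
--
--     #check phrash keyword if no keyword find in single keyword
--     if keyword_weight == 0:
--         for keyword in job_skill_phrase_keywords:
--             #if match
--             keyword_content = keyword[0: keyword.index("*")].strip().lower()
--             if keyword_content == search_keyword:
--                 keyword_weight = int(keyword[keyword.index("*") + 1: len(keyword)].strip())
--                 #print ( "**phrase keyword " +search_keyword + " weight:"+ str(keyword[keyword.index("*") + 1: len(keyword)]))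
--                 break
--     return keyword_weight
-- ===== SOURCE B (Python) =====
-- job_skill_single_keywords = ["Java*10", "Node.js*6", "AngularJS*4","JavaScript*4", "Maven*3", "web*2", "Agile*5"]
--
-- job_skill_phrase_keywords = ["REST service*4", "REST services*5", "Web Service*9", "Web Services*9", "project manager*3", "team work*5"
--                              ,"computer science*8"]
--
-- # One table, built once at module load: phrase entries first, then single
-- # entries, so single keywords would win any collision (matching A's priority).
-- _WEIGHTS = {}
-- for _kw in job_skill_phrase_keywords + job_skill_single_keywords:
--     _name, _w = _kw.split("*")
--     _WEIGHTS[_name.strip().lower()] = int(_w.strip())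
--
-- def get_weight_from_keyword(search_keyword):
--     return _WEIGHTS.get(search_keyword, 0)
-- ===== Notes on version B (the rewrite author's own statement) =====
-- stated objective: simpler
-- what changed: Replaced the two per-call linear scans (with slicing, stripping and break) by a weight table built once at module load from both keyword lists (phrases inserted first so singles win any collision); the function body is a single dict .get(search_keyword, 0).
import Mathlib
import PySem

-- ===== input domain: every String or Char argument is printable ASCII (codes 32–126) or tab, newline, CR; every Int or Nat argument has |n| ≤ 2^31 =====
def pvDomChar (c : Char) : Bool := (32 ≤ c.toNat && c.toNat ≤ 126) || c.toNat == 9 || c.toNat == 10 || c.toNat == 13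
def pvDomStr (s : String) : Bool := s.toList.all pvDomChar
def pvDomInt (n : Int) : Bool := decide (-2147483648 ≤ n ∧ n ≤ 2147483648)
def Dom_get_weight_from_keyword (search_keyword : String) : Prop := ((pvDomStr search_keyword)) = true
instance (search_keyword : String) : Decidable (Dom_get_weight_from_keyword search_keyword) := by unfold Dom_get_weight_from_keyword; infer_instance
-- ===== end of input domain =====

-- B replaces A's two per-call scans by a table built once from both lists; the body is one lookup with default 0.

set_option maxHeartbeats 2000000

-- ===== PORT A =====
def job_skill_single_keywords : List String := ["Java*10", "Node.js*6", "AngularJS*4", "JavaScript*4", "Maven*3", "web*2", "Agile*5"]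

def job_skill_phrase_keywords : List String := ["REST service*4", "REST services*5", "Web Service*9", "Web Services*9", "project manager*3", "team work*5", "computer science*8"]

-- keyword[0: keyword.index("*")].strip().lower()  (every list literal contains "*", so .index never raises)
def pvContent (keyword : String) : String :=
  PySem.Str.lower (PySem.Str.strip (PySem.Str.slice keyword (some 0) (some (PySem.Str.find keyword "*"))))

-- int(keyword[keyword.index("*") + 1: len(keyword)].strip())  (getD 0 is unreachable on the literal lists: int() never raises there)
def pvWeightOf (keyword : String) : Int :=
  (PySem.Int.ofStr? (PySem.Str.strip (PySem.Str.slice keyword (some (PySem.Str.find keyword "*" + 1)) (some (PySem.Str.len keyword))))).getD 0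

-- the for-loop with break: first matching keyword's weight, else the initial 0
def pvALoop (kws : List String) (search_keyword : String) : Int :=
  match kws with
  | [] => 0
  | keyword :: rest =>
    if pvContent keyword = search_keyword then pvWeightOf keyword
    else pvALoop rest search_keyword

def get_weight_from_keyword (search_keyword : String) : Int :=
  let keyword_weight := pvALoop job_skill_single_keywords search_keyword
  if keyword_weight = 0 then pvALoop job_skill_phrase_keywords search_keyword
  else keyword_weight

-- ===== PORT B =====
-- the module-load loop building _WEIGHTS: name, w = kw.split("*"); d[name.strip().lower()] = int(w.strip())
def pvAddEntry (d : PySem.Dict String Int) (kw : String) : PySem.Dict String Int :=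
  match PySem.Str.split? kw "*" with
  | some [name, w] => d.insert (PySem.Str.lower (PySem.Str.strip name)) ((PySem.Int.ofStr? (PySem.Str.strip w)).getD 0)
  | _ => d  -- unreachable on the literal lists (every entry has exactly one "*"); tuple unpacking would raise otherwise

def pvWEIGHTS : PySem.Dict String Int :=
  (job_skill_phrase_keywords ++ job_skill_single_keywords).foldl pvAddEntry PySem.Dict.empty

def get_weight_from_keyword_alt (search_keyword : String) : Int :=
  pvWEIGHTS.getD search_keyword 0

-- ===== PRECONDITION & SPEC =====
def Spec_get_weight_from_keyword (search_keyword : String) (out : Int) : Prop := out = get_weight_from_keyword_alt search_keyword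
instance (search_keyword : String) (out : Int) : Decidable (Spec_get_weight_from_keyword search_keyword out) := by unfold Spec_get_weight_from_keyword; infer_instance

-- ===== CLAIM (what is proved, stated in full; the proofs are below) =====
def Claim_equal_get_weight_from_keyword : Prop := ∀ (search_keyword : String), Dom_get_weight_from_keyword search_keyword → Spec_get_weight_from_keyword search_keyword (get_weight_from_keyword search_keyword)

-- ===== LEMMAS AND PROOFS =====
theorem A_chain (s : String) : get_weight_from_keyword s =
    (let w : Int := if "java" = s then 10 else if "node.js" = s then 6 else if "angularjs" = s then 4 else if "javascript" = s then 4 else if "maven" = s then 3 else if "web" = s then 2 else if "agile" = s then 5 else 0;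
     if w = 0 then (if "rest service" = s then 4 else if "rest services" = s then 5 else if "web service" = s then 9 else if "web services" = s then 9 else if "project manager" = s then 3 else if "team work" = s then 5 else if "computer science" = s then 8 else 0)
     else w) := by
  rfl

theorem getD_mk_foldr (l : List (String × Int)) (s : String) :
    (PySem.Dict.mk l).getD s 0 = l.foldr (fun kv acc => if kv.1 = s then kv.2 else acc) (0 : Int) := by
  induction l with
  | nil => rfl
  | cons kv t ih =>
    obtain ⟨k, v⟩ := kv
    simp only [PySem.Dict.getD, PySem.Dict.get?_mk_cons, beq_iff_eq] at *
    by_cases h : k = s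
    · simp [h]
    · simp [h, ih]

theorem B_chain (s : String) : get_weight_from_keyword_alt s =
    (if "rest service" = s then 4 else if "rest services" = s then 5 else if "web service" = s then 9 else if "web services" = s then 9 else if "project manager" = s then 3 else if "team work" = s then 5 else if "computer science" = s then 8 else if "java" = s then 10 else if "node.js" = s then 6 else if "angularjs" = s then 4 else if "javascript" = s then 4 else if "maven" = s then 3 else if "web" = s then 2 else if "agile" = s then 5 else 0) := by
  have hW : pvWEIGHTS = PySem.Dict.mk [("rest service", (4:Int)), ("rest services", 5), ("web service", 9), ("web services", 9), ("project manager", 3), ("team work", 5), ("computer science", 8), ("java", 10), ("node.js", 6), ("angularjs", 4), ("javascript", 4), ("maven", 3), ("web", 2), ("agile", 5)] := by decide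
  rw [show get_weight_from_keyword_alt s = pvWEIGHTS.getD s 0 from rfl, hW, getD_mk_foldr]
  rfl

theorem A_chain2 (s : String) : get_weight_from_keyword s =
    (if "java" = s then 10 else if "node.js" = s then 6 else if "angularjs" = s then 4 else if "javascript" = s then 4 else if "maven" = s then 3 else if "web" = s then 2 else if "agile" = s then 5 else (if "rest service" = s then 4 else if "rest services" = s then 5 else if "web service" = s then 9 else if "web services" = s then 9 else if "project manager" = s then 3 else if "team work" = s then 5 else if "computer science" = s then 8 else 0)) := by
  rw [A_chain]
  by_cases h0 : "java" = s
  · subst h0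
    simp
  by_cases h1 : "node.js" = s
  · subst h1
    simp
  by_cases h2 : "angularjs" = s
  · subst h2
    simp
  by_cases h3 : "javascript" = s
  · subst h3
    simp
  by_cases h4 : "maven" = s
  · subst h4
    simp
  by_cases h5 : "web" = s
  · subst h5
    simp
  by_cases h6 : "agile" = s
  · subst h6
    simp
  simp [h0, h1, h2, h3, h4, h5, h6]

theorem chains_eq (s : String) :
    ((if "java" = s then 10 else if "node.js" = s then 6 else if "angularjs" = s then 4 else if "javascript" = s then 4 else if "maven" = s then 3 else if "web" = s then 2 else if "agile" = s then 5 else (if "rest service" = s then 4 else if "rest services" = s then 5 else if "web service" = s then 9 else if "web services" = s then 9 else if "project manager" = s then 3 else if "team work" = s then 5 else if "computer science" = s then 8 else 0)) : Int) = (if "rest service" = s then 4 else if "rest services" = s then 5 else if "web service" = s then 9 else if "web services" = s then 9 else if "project manager" = s then 3 else if "team work" = s then 5 else if "computer science" = s then 8 else if "java" = s then 10 else if "node.js" = s then 6 else if "angularjs" = s then 4 else if "javascript" = s then 4 else if "maven" = s then 3 else if "web" = s then 2 else if "agile" = s then 5 else 0) := by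
  by_cases g0 : "rest service" = s
  · subst g0
    simp
  by_cases g1 : "rest services" = s
  · subst g1
    simp
  by_cases g2 : "web service" = s
  · subst g2
    simp
  by_cases g3 : "web services" = s
  · subst g3
    simp
  by_cases g4 : "project manager" = s
  · subst g4
    simp
  by_cases g5 : "team work" = s
  · subst g5
    simp
  by_cases g6 : "computer science" = s
  · subst g6
    simp
  by_cases g7 : "java" = s
  · subst g7
    simp
  by_cases g8 : "node.js" = s
  · subst g8
    simp
  by_cases g9 : "angularjs" = s
  · subst g9
    simp
  by_cases g10 : "javascript" = s
  · subst g10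
    simp
  by_cases g11 : "maven" = s
  · subst g11
    simp
  by_cases g12 : "web" = s
  · subst g12
    simp
  by_cases g13 : "agile" = s
  · subst g13
    simp
  simp [g0, g1, g2, g3, g4, g5, g6, g7, g8, g9, g10, g11, g12, g13]


-- ===== VERDICT (by name: the statement is the Claim_ definition above) =====
theorem get_weight_from_keyword_spec : Claim_equal_get_weight_from_keyword := by
  intro s _
  unfold Spec_get_weight_from_keyword
  rw [A_chain2, chains_eq, B_chain]
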